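-- pv_equiv track=rewrite | github.com/BigDataArchitecture/FinalProjectStreamlit | Pages/helper.py | clear_summary
-- ===== SOURCE A (Python) =====
-- def clear_summary(text):
--     list1 = text.split()
--     for i in list1:
--         if len(str(i)) > 15:
--             return False
--         else:
--             continue
--     return True
-- ===== SOURCE B (Python) =====
-- def clear_summary(text):
--     run = 0
--     for ch in text:
--         if ch.isspace():
--             run = 0
--         else:
--             run += 1
--             if run > 15:
--                 return False
--     return True
-- ===== Notes on version B (the rewrite author's own statement) =====
-- stated objective: alternative
-- what changed: B replaces split-into-words-then-loop with a single character scan keeping a run-length counter of consecutive non-whitespace characters, never building the word list and exiting at the first run of 16.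
import Mathlib
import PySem

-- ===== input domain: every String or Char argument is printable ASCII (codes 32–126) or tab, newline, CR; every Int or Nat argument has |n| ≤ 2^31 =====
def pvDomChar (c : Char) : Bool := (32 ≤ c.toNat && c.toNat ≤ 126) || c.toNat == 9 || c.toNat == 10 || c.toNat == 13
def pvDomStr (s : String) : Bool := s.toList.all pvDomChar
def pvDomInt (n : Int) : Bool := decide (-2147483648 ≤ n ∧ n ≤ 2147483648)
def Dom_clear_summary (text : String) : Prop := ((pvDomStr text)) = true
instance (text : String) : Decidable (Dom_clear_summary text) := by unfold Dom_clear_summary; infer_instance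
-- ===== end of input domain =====

-- B replaces split-into-words-then-loop by a single O(1)-space character scan with a
-- run-length counter of consecutive non-whitespace characters, O(1) extra space (objective: alternative).


-- ===== PORT A =====
-- A's loop over the word list with early return False
def pvLoopA : List String → Bool
  | [] => true
  | w :: ws => if PySem.Str.len w > 15 then false else pvLoopA ws

def clear_summary (text : String) : Bool :=
  pvLoopA (PySem.Str.split₀ text)

-- ===== PORT B =====
-- B's single scan: run = length of the current run of non-whitespace characters
def pvScanB : List Char → Nat → Bool
  | [], _ => true
  | c :: rest, run =>
    if PySem.Chars.isspace c then pvScanB rest 0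
    else if run + 1 > 15 then false else pvScanB rest (run + 1)

def clear_summary_alt (text : String) : Bool :=
  pvScanB text.toList 0

-- ===== PRECONDITION & SPEC =====
def Spec_clear_summary (text : String) (out : Bool) : Prop := out = clear_summary_alt text
instance (text : String) (out : Bool) : Decidable (Spec_clear_summary text out) := by unfold Spec_clear_summary; infer_instance

-- ===== CLAIM (what is proved, stated in full; the proofs are below) =====
def Claim_equal_clear_summary : Prop := ∀ (text : String), Dom_clear_summary text → Spec_clear_summary text (clear_summary text)

-- ===== LEMMAS AND PROOFS =====

-- A's loop is "all words have length ≤ 15"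
theorem pvLoopA_eq (ws : List (List Char)) :
    pvLoopA (ws.map String.ofList) = ws.all (fun w => decide (w.length ≤ 15)) := by
  induction ws with
  | nil => rfl
  | cons w ws ih =>
    simp only [List.map_cons, pvLoopA, List.all_cons, ih, PySem.Str.len]
    by_cases h : w.length ≤ 15
    · simp [h, String.toList_ofList, Nat.not_lt.mpr h]
    · simp [String.toList_ofList, Nat.lt_of_not_le h, h]

-- words already accumulated stay in the result of split₀.go
theorem mem_go_of_mem_acc (cs : List Char) (cur : List Char) (acc : List (List Char))
    (a : List Char) (ha : a ∈ acc) : a ∈ PySem.Chars.split₀.go cs cur acc := by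
  induction cs generalizing cur acc with
  | nil =>
    simp only [PySem.Chars.split₀.go]
    split <;> simp [ha]
  | cons c rest ih =>
    simp only [PySem.Chars.split₀.go]
    split
    · split
      · exact ih _ _ ha
      · exact ih _ _ (List.mem_cons_of_mem _ ha)
    · exact ih _ _ ha

-- a nonempty current word ends up (extended) in the result
theorem exists_long (cs : List Char) (cur : List Char) (acc : List (List Char))
    (h : cur ≠ []) : ∃ w ∈ PySem.Chars.split₀.go cs cur acc, cur.length ≤ w.length := by
  induction cs generalizing cur acc with
  | nil =>
    refine ⟨cur.reverse, ?_, by simp⟩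
    simp [PySem.Chars.split₀.go, List.isEmpty_iff, h]
  | cons c rest ih =>
    simp only [PySem.Chars.split₀.go]
    split
    · rw [if_neg (by simpa [List.isEmpty_iff] using h)]
      exact ⟨cur.reverse, mem_go_of_mem_acc _ _ _ _ (by simp), by simp⟩
    · obtain ⟨w, hw, hlen⟩ := ih (c :: cur) acc (by simp)
      exact ⟨w, hw, le_trans (by simp) hlen⟩

-- main invariant: the scan with run = cur.length decides "all result words ≤ 15"
theorem pvScanB_eq (cs : List Char) (cur : List Char) (acc : List (List Char))
    (hacc : ∀ w ∈ acc, w.length ≤ 15) (hcur : cur.length ≤ 15) :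
    pvScanB cs cur.length =
      (PySem.Chars.split₀.go cs cur acc).all (fun w => decide (w.length ≤ 15)) := by
  induction cs generalizing cur acc with
  | nil =>
    simp only [pvScanB, PySem.Chars.split₀.go]
    split
    · rw [List.all_reverse]
      exact (List.all_eq_true.mpr (fun w hw => by simpa using hacc w hw)).symm
    · rw [List.all_reverse]
      symm; apply List.all_eq_true.mpr
      intro w hw
      rcases List.mem_cons.mp hw with h | h
      · subst h; simpa using hcur
      · simpa using hacc w h
  | cons c rest ih =>
    simp only [pvScanB, PySem.Chars.split₀.go]
    split
    · -- whitespace: reset run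
      split
      · exact (List.length_nil (α := Char)) ▸ ih [] acc hacc (by simp)
      · exact (List.length_nil (α := Char)) ▸ ih [] (cur.reverse :: acc)
          (by intro w hw; rcases List.mem_cons.mp hw with h | h
              · subst h; simpa using hcur
              · exact hacc w h) (by simp)
    · -- non-whitespace
      by_cases hlen : cur.length + 1 > 15
      · rw [if_pos hlen]
        obtain ⟨w, hw, hwlen⟩ := exists_long rest (c :: cur) acc (by simp)
        symm
        refine List.all_eq_false.mpr ⟨w, hw, ?_⟩
        simp only [List.length_cons] at hwlen
        simp; omega
      · rw [if_neg hlen]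
        have : cur.length + 1 = (c :: cur).length := by simp
        rw [this]
        exact ih (c :: cur) acc hacc (by simp; omega)

-- ===== VERDICT (by name: the statement is the Claim_ definition above) =====
theorem clear_summary_spec : Claim_equal_clear_summary := by
  intro text _
  unfold Spec_clear_summary clear_summary clear_summary_alt PySem.Str.split₀
  rw [pvLoopA_eq]
  rw [show (0 : Nat) = ([] : List Char).length from rfl]
  rw [pvScanB_eq text.toList [] [] (by simp) (by simp)]
  rfl
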